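-- pv_equiv track=rewrite | github.com/gustavohenriquesoares/Atividade_04_IESGOLTP1_Questoes | exercicio12.py | contar_letras_nome
-- ===== SOURCE A (Python) =====
-- def contar_letras_nome(texto):
--     nome = "seunome"
--     texto = texto.lower()
--     nome = nome.lower()
--     contador = 0
--     for letra in texto:
--         if letra in nome:
--             contador += 1
--     return contador
-- ===== SOURCE B (Python) =====
-- def contar_letras_nome(texto):
--     cnt = {}
--     for ch in texto.lower():
--         cnt[ch] = cnt.get(ch, 0) + 1
--     return sum(cnt.get(c, 0) for c in set("seunome"))
-- ===== Notes on version B (the rewrite author's own statement) =====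
-- stated objective: alternative
-- what changed: B builds a frequency table of the lowered text in one pass and sums the counts of the six distinct name letters, instead of testing each text character for membership in the name string.
import Mathlib
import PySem

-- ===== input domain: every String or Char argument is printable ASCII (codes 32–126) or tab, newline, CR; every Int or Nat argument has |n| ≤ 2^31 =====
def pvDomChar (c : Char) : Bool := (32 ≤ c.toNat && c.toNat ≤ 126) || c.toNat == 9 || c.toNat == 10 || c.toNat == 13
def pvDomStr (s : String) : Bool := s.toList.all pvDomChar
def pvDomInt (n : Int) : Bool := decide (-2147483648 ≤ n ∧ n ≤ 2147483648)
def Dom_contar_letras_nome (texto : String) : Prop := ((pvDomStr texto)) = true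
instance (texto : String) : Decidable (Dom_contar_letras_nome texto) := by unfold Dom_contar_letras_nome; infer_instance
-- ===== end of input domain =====

-- B builds a frequency table (counter) of the lowered text once and sums the counts of
-- the distinct name letters, instead of a membership test per text character (alternative).


-- ===== PORT A =====
-- 'letra in nome' (a one-char string in a string) is exactly char membership in nome's chars
def contar_letras_nome (texto : String) : Int :=
  let nome := "seunome"
  let texto := PySem.Str.lower texto
  let nome := PySem.Str.lower nome
  texto.toList.foldl (fun contador letra => if letra ∈ nome.toList then contador + 1 else contador) 0

-- ===== PORT B =====
def contar_letras_nome_alt (texto : String) : Int :=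
  let cnt := PySem.Dict.counter (PySem.Str.lower texto).toList
  (PySem.Set.ofList "seunome".toList).foldl (fun acc c => acc + cnt.getD c 0) 0

-- ===== PRECONDITION & SPEC =====
def Spec_contar_letras_nome (texto : String) (out : Int) : Prop := out = contar_letras_nome_alt texto
instance (texto : String) (out : Int) : Decidable (Spec_contar_letras_nome texto out) := by unfold Spec_contar_letras_nome; infer_instance

-- ===== CLAIM (what is proved, stated in full; the proofs are below) =====
def Claim_equal_contar_letras_nome : Prop := ∀ (texto : String), Dom_contar_letras_nome texto → Spec_contar_letras_nome texto (contar_letras_nome texto)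

-- ===== LEMMAS AND PROOFS =====
-- counting members of the name = summing the counts of its six distinct letters
theorem pv_countP_eq_sum_counts (l : List Char) :
    l.countP (fun c => decide (c ∈ "seunome".toList))
      = l.count 's' + l.count 'e' + l.count 'u' + l.count 'n' + l.count 'o' + l.count 'm' := by
  induction l with
  | nil => rfl
  | cons x t ih =>
    simp only [List.countP_cons, List.count_cons, ih]
    have hmem : "seunome".toList = ['s', 'e', 'u', 'n', 'o', 'm', 'e'] := rfl
    by_cases hx : x ∈ "seunome".toList
    · rw [hmem] at hx
      simp only [List.mem_cons, List.not_mem_nil, or_false] at hx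
      rcases hx with h | h | h | h | h | h | h <;> subst h <;> simp <;> omega
    · have hs : x ≠ 's' ∧ x ≠ 'e' ∧ x ≠ 'u' ∧ x ≠ 'n' ∧ x ≠ 'o' ∧ x ≠ 'm' := by
        rw [hmem] at hx
        simp only [List.mem_cons, List.not_mem_nil, or_false, not_or] at hx
        exact ⟨hx.1, hx.2.1, hx.2.2.1, hx.2.2.2.1, hx.2.2.2.2.1, hx.2.2.2.2.2.1⟩
      obtain ⟨h1, h2, h3, h4, h5, h6⟩ := hs
      simp [h1, h2, h3, h4, h5, h6]

theorem contar_letras_nome_spec : Claim_equal_contar_letras_nome := by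
  intro texto _
  unfold Spec_contar_letras_nome contar_letras_nome contar_letras_nome_alt
  simp only []
  set l := (PySem.Str.lower texto).toList with hl
  have hA : l.foldl (fun contador letra =>
      if letra ∈ (PySem.Str.lower "seunome").toList then contador + 1 else contador) (0 : Int)
      = (l.countP (fun c => decide (c ∈ "seunome".toList)) : Int) := by
    have : (PySem.Str.lower "seunome").toList = "seunome".toList := by decide
    rw [this, PySem.List.foldl_ite_add_one]
    simp
  have hset : PySem.Set.ofList "seunome".toList = ['s', 'e', 'u', 'n', 'o', 'm'] := by decide
  rw [hA, hset]
  simp only [List.foldl_cons, List.foldl_nil, PySem.Dict.getD_counter]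
  rw [pv_countP_eq_sum_counts]
  push_cast
  ring
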